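-- pv_equiv track=rewrite | github.com/INTERMAGNET/IMBOT | imbot/minuteanalysis.py | GetNewInputs
-- ===== SOURCE A (Python) =====
-- def GetNewInputs(memory,newdict, notification={}):
--         """
--         DESCRIPTION
--             will return a dictionary with key/value pairs from dir analysis
--             which are not in memory
--         """
--         # newly uploaded
--         newlist = []
--         tmp = {k:v for k,v in newdict.items() if k not in memory}
--         for key in tmp:
--             newlist.append(key)
--         # newly uploaded and updated
--         updatelist = []
--         C = {k:v for k,v in newdict.items() if k not in memory or v != memory[k]}
--         for key in C:
--             if not key in newlist:
--                 updatelist.append(key)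
--         notification['New Uploads'] = newlist
--         notification['Updated data'] = updatelist
--
--         return C, notification
-- ===== SOURCE B (Python) =====
-- def GetNewInputs(memory, newdict, notification={}):
--     """Single pass over newdict.items(): classify each key as new or updated
--     while building C, instead of two dict comprehensions plus two follow-up
--     loops with a list-membership test."""
--     newlist = []
--     updatelist = []
--     C = {}
--     for k, v in newdict.items():
--         if k not in memory:
--             C[k] = v
--             newlist.append(k)
--         elif v != memory[k]:
--             C[k] = v
--             updatelist.append(k)
--     notification['New Uploads'] = newlist
--     notification['Updated data'] = updatelist
--     return C, notification
-- ===== Notes on version B (the rewrite author's own statement) =====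
-- stated objective: faster
-- what changed: Fuses A's two dict comprehensions and two follow-up loops (one with a linear 'key not in newlist' list scan) into one loop over newdict.items() that classifies each key as new or updated while building C.
import Mathlib
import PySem

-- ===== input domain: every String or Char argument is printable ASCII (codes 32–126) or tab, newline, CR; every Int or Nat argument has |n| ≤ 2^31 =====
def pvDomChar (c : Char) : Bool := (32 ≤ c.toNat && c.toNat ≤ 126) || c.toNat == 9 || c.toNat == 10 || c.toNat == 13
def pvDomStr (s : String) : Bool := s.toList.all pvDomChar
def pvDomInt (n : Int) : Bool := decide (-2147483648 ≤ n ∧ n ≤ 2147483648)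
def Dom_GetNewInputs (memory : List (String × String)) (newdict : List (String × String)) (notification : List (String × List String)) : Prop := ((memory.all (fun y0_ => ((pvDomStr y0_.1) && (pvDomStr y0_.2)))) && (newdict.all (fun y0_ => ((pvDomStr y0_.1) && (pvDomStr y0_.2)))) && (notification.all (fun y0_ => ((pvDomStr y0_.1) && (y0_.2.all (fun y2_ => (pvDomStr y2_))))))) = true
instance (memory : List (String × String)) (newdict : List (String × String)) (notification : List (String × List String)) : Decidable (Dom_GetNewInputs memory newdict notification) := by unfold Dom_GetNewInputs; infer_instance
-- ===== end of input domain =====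

-- B fuses A's two dict comprehensions and two follow-up loops (one with a linear
-- 'key not in newlist' list scan) into one classifying pass over newdict.items();
-- A also mutates `notification` in place and B performs the same mutation
-- (the proved equivalence covers the returned pair, whose second component is it).


-- ===== PORT A =====
-- literal transliteration of A; `memory` and `newdict` are Python dicts, so
-- (under Pre_, unique keys) 'k in memory' is key membership, 'memory[k]' is the
-- first-match lookup, and a dict comprehension over newdict.items() keeps
-- exactly the passing items in order (exact under Pre_).
def GetNewInputs (memory : List (String × String)) (newdict : List (String × String)) (notification : List (String × List String)) : (List (String × String)) × (List (String × List String)) :=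
  let mem := PySem.Dict.mk memory
  -- tmp = {k:v for k,v in newdict.items() if k not in memory}
  let tmp := newdict.filter (fun kv => !(mem.contains kv.1))
  -- for key in tmp: newlist.append(key)
  let newlist := tmp.foldl (fun acc kv => acc ++ [kv.1]) ([] : List String)
  -- C = {k:v for k,v in newdict.items() if k not in memory or v != memory[k]}
  let C := newdict.filter (fun kv => !(mem.contains kv.1) || !(mem.get? kv.1 == some kv.2))
  -- for key in C: if not key in newlist: updatelist.append(key)
  let updatelist := C.foldl (fun acc kv => if newlist.contains kv.1 then acc else acc ++ [kv.1]) ([] : List String)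
  -- notification['New Uploads'] = newlist; notification['Updated data'] = updatelist
  let notif := ((PySem.Dict.mk notification).insert "New Uploads" newlist).insert "Updated data" updatelist
  (C, notif.items)

-- ===== PORT B =====
-- literal transliteration of Source B: one foldl over newdict.items() carrying
-- (C, newlist, updatelist); bStep is the loop body.
def bStep (mem : PySem.Dict String String) (st : PySem.Dict String String × List String × List String) (kv : String × String) : PySem.Dict String String × List String × List String :=
  if !(mem.contains kv.1) then
    (st.1.insert kv.1 kv.2, st.2.1 ++ [kv.1], st.2.2)
  else if !(mem.get? kv.1 == some kv.2) then
    (st.1.insert kv.1 kv.2, st.2.1, st.2.2 ++ [kv.1])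
  else st

def GetNewInputs_alt (memory : List (String × String)) (newdict : List (String × String)) (notification : List (String × List String)) : (List (String × String)) × (List (String × List String)) :=
  let mem := PySem.Dict.mk memory
  let st := newdict.foldl (bStep mem) (PySem.Dict.empty, ([] : List String), ([] : List String))
  let notif := ((PySem.Dict.mk notification).insert "New Uploads" st.2.1).insert "Updated data" st.2.2
  (st.1.items, notif.items)

-- ===== PRECONDITION & SPEC =====
-- Pre_ excludes association lists with duplicate keys in `memory` or `newdict`:
-- such lists do not denote a Python dict (dict construction deduplicates, last
-- value wins), so they correspond to no input the Python function ever sees.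
def Pre_GetNewInputs (memory : List (String × String)) (newdict : List (String × String)) (notification : List (String × List String)) : Prop :=
  (memory.map Prod.fst).Nodup ∧ (newdict.map Prod.fst).Nodup
instance (memory : List (String × String)) (newdict : List (String × String)) (notification : List (String × List String)) : Decidable (Pre_GetNewInputs memory newdict notification) := by unfold Pre_GetNewInputs; infer_instance
def pvWitness_GetNewInputs : (List (String × String)) × (List (String × String)) × (List (String × List String)) :=
  ([("a", "1"), ("b", "2")], [("b", "9"), ("c", "3")], [("x", ["y"])])

def Spec_GetNewInputs (memory : List (String × String)) (newdict : List (String × String)) (notification : List (String × List String)) (out : (List (String × String)) × (List (String × List String))) : Prop := out = GetNewInputs_alt memory newdict notification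
instance (memory : List (String × String)) (newdict : List (String × String)) (notification : List (String × List String)) (out : (List (String × String)) × (List (String × List String))) : Decidable (Spec_GetNewInputs memory newdict notification out) := by unfold Spec_GetNewInputs; infer_instance

-- ===== CLAIM (what is proved, stated in full; the proofs are below) =====
def Claim_equal_GetNewInputs : Prop := ∀ (memory : List (String × String)) (newdict : List (String × String)) (notification : List (String × List String)), Dom_GetNewInputs memory newdict notification → Pre_GetNewInputs memory newdict notification → Spec_GetNewInputs memory newdict notification (GetNewInputs memory newdict notification)

-- ===== LEMMAS AND PROOFS =====

theorem bStep_new (mem : PySem.Dict String String) (st : PySem.Dict String String × List String × List String) (kv : String × String) (h1 : mem.contains kv.1 = false) :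
    bStep mem st kv = (st.1.insert kv.1 kv.2, st.2.1 ++ [kv.1], st.2.2) := by
  simp [bStep, h1]

theorem bStep_upd (mem : PySem.Dict String String) (st : PySem.Dict String String × List String × List String) (kv : String × String) (h1 : mem.contains kv.1 = true) (h2 : (mem.get? kv.1 == some kv.2) = false) :
    bStep mem st kv = (st.1.insert kv.1 kv.2, st.2.1, st.2.2 ++ [kv.1]) := by
  simp [bStep, h1, h2]

theorem bStep_skip (mem : PySem.Dict String String) (st : PySem.Dict String String × List String × List String) (kv : String × String) (h1 : mem.contains kv.1 = true) (h2 : (mem.get? kv.1 == some kv.2) = true) :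
    bStep mem st kv = st := by
  simp [bStep, h1, h2]

-- A's first loop: foldl that appends first components = map
theorem foldl_append_fst (l : List (String × String)) (acc : List String) :
    l.foldl (fun acc kv => acc ++ [kv.1]) acc = acc ++ l.map Prod.fst := by
  induction l generalizing acc with
  | nil => simp
  | cons kv rest ih => rw [List.foldl_cons, ih]; simp

-- A's second loop: appending the keys not in a fixed list = filter-then-map
theorem foldl_append_if_not_mem (nl : List String) (l : List (String × String)) (acc : List String) :
    l.foldl (fun acc kv => if nl.contains kv.1 then acc else acc ++ [kv.1]) acc
      = acc ++ (l.filter (fun kv => !(nl.contains kv.1))).map Prod.fst := by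
  induction l generalizing acc with
  | nil => simp
  | cons kv rest ih =>
    rw [List.foldl_cons, ih, List.filter_cons]
    by_cases h : kv.1 ∈ nl <;> simp [h]

-- B's loop, characterised (starting from fresh distinct keys)
theorem b_fold (mem : PySem.Dict String String) (l : List (String × String))
    (C : PySem.Dict String String) (nl ul : List String)
    (hnd : (l.map Prod.fst).Nodup) (hfresh : ∀ kv ∈ l, C.contains kv.1 = false) :
    l.foldl (bStep mem) (C, nl, ul)
    = (PySem.Dict.mk (C.items ++ l.filter (fun kv => !(mem.contains kv.1) || !(mem.get? kv.1 == some kv.2))),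
       nl ++ (l.filter (fun kv => !(mem.contains kv.1))).map Prod.fst,
       ul ++ (l.filter (fun kv => mem.contains kv.1 && !(mem.get? kv.1 == some kv.2))).map Prod.fst) := by
  induction l generalizing C nl ul with
  | nil => simp
  | cons kv rest ih =>
    have hk : C.contains kv.1 = false := hfresh kv (List.mem_cons_self ..)
    have hnd' : (rest.map Prod.fst).Nodup := (List.nodup_cons.mp hnd).2
    have hne : kv.1 ∉ rest.map Prod.fst := (List.nodup_cons.mp hnd).1
    have hfresh₂ : ∀ kv' ∈ rest, C.contains kv'.1 = false :=
      fun kv' h' => hfresh kv' (List.mem_cons_of_mem _ h')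
    have hfresh' : ∀ kv' ∈ rest, (C.insert kv.1 kv.2).contains kv'.1 = false := by
      intro kv' h'
      rw [PySem.Dict.contains_insert]
      have : (kv'.1 == kv.1) = false := by
        simp only [beq_eq_false_iff_ne]
        intro he
        exact hne (he ▸ List.mem_map_of_mem h')
      simp [this, hfresh₂ kv' h']
    have hins : (C.insert kv.1 kv.2).items = C.items ++ [(kv.1, kv.2)] :=
      PySem.Dict.items_insert_of_not_contains _ kv.2 hk
    rw [List.foldl_cons]
    by_cases h1 : mem.contains kv.1 = true
    · by_cases h2 : (mem.get? kv.1 == some kv.2) = true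
      · rw [bStep_skip mem _ kv h1 h2, ih C nl ul hnd' hfresh₂]
        simp [h1, h2]
      · rw [bStep_upd mem _ kv h1 (Bool.eq_false_iff.mpr h2), ih _ _ _ hnd' hfresh']
        simp [h1, Bool.eq_false_iff.mpr h2, hins]
    · rw [bStep_new mem _ kv (Bool.eq_false_iff.mpr h1), ih _ _ _ hnd' hfresh']
      simp [Bool.eq_false_iff.mpr h1, hins]

-- with distinct keys, membership of the key of kv ∈ l in A's newlist is exactly
-- 'kv.1 is not a key of memory'
theorem mem_newlist_iff (mem : PySem.Dict String String) (l : List (String × String))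
    (hnd : (l.map Prod.fst).Nodup) (kv : String × String) (hkv : kv ∈ l) :
    ((l.filter (fun kv => !(mem.contains kv.1))).map Prod.fst).contains kv.1
      = !(mem.contains kv.1) := by
  by_cases h : mem.contains kv.1 = true
  · simp only [h, Bool.not_true]
    have hnm : kv.1 ∉ (l.filter (fun kv => !(mem.contains kv.1))).map Prod.fst := by
      intro hm
      obtain ⟨kv', hkv', he⟩ := List.mem_map.mp hm
      have hkv'l := (List.mem_filter.mp hkv').1
      have hq := (List.mem_filter.mp hkv').2
      have : kv' = kv := List.inj_on_of_nodup_map hnd hkv'l hkv he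
      rw [this] at hq
      simp [h] at hq
    simpa using hnm
  · simp only [Bool.eq_false_iff.mpr h, Bool.not_false]
    have : kv ∈ l.filter (fun kv => !(mem.contains kv.1)) :=
      List.mem_filter.mpr ⟨hkv, by simp [Bool.eq_false_iff.mpr h]⟩
    simpa using List.mem_map_of_mem (f := Prod.fst) this

-- ===== VERDICT (by name: the statement is the Claim_ definition above) =====
theorem GetNewInputs_spec : Claim_equal_GetNewInputs := by
  intro memory newdict notification _ hpre
  obtain ⟨hmem, hnew⟩ := hpre
  unfold Spec_GetNewInputs GetNewInputs GetNewInputs_alt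
  simp only []
  rw [b_fold (PySem.Dict.mk memory) newdict PySem.Dict.empty [] [] hnew (fun kv _ => rfl)]
  simp only [List.nil_append]
  refine Prod.ext rfl ?_
  simp only []
  rw [foldl_append_fst, foldl_append_if_not_mem, List.nil_append, List.nil_append,
      List.filter_filter]
  congr 2
  refine congrArg (List.map Prod.fst) (List.filter_congr ?_)
  intro kv hkv
  rw [mem_newlist_iff _ _ hnew kv hkv]
  cases h : (PySem.Dict.mk memory).contains kv.1 <;> simp
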